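-- pv_equiv track=rewrite | github.com/paulfchristiano/amplification | amplification/models/asker.py | make_transcript
-- ===== SOURCE A (Python) =====
-- class TokenTypes():
--     subQ = 0
--     subA = 1
--     mainQ = 2
--     mainA = 3
--     num = 4
--
-- def make_transcript(main_Q, sub_Qs, sub_As, main_A=None):
--     transcript = []
--     tokens = []
--     transcript.extend(main_Q)
--     tokens.extend([TokenTypes.mainQ] * len(main_Q))
--     for sub_Q, sub_A in zip(sub_Qs, sub_As):
--         transcript.extend(sub_Q)
--         tokens.extend([TokenTypes.subQ] * len(sub_Q))
--         transcript.extend(sub_A)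
--         tokens.extend([TokenTypes.subA] * len(sub_A))
--     if main_A is not None:
--         transcript.extend(main_A)
--         tokens.extend([TokenTypes.mainA] * len(main_A))
--     return transcript, tokens
-- ===== SOURCE B (Python) =====
-- class TokenTypes():
--     subQ = 0
--     subA = 1
--     mainQ = 2
--     mainA = 3
--     num = 4
--
-- def make_transcript(main_Q, sub_Qs, sub_As, main_A=None):
--     # Recursively build one element-level stream of (token, token_type) pairs,
--     # then unzip it into the two outputs.
--     def tagged(qs, ans):
--         if not qs or not ans:
--             if main_A is None:
--                 return []
--             return [(t, TokenTypes.mainA) for t in main_A]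
--         return ([(t, TokenTypes.subQ) for t in qs[0]]
--                 + [(t, TokenTypes.subA) for t in ans[0]]
--                 + tagged(qs[1:], ans[1:]))
--     pairs = [(t, TokenTypes.mainQ) for t in main_Q] + tagged(sub_Qs, sub_As)
--     transcript = [t for t, _ in pairs]
--     tokens = [y for _, y in pairs]
--     return transcript, tokens
-- ===== Notes on version B (the rewrite author's own statement) =====
-- stated objective: alternative
-- what changed: B recursively builds a single element-level stream of (token, token_type) pairs (each token individually tagged) and obtains both outputs by unzipping it, instead of A's iterative loop maintaining two parallel accumulators with four extend calls per iteration.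
import Mathlib
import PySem

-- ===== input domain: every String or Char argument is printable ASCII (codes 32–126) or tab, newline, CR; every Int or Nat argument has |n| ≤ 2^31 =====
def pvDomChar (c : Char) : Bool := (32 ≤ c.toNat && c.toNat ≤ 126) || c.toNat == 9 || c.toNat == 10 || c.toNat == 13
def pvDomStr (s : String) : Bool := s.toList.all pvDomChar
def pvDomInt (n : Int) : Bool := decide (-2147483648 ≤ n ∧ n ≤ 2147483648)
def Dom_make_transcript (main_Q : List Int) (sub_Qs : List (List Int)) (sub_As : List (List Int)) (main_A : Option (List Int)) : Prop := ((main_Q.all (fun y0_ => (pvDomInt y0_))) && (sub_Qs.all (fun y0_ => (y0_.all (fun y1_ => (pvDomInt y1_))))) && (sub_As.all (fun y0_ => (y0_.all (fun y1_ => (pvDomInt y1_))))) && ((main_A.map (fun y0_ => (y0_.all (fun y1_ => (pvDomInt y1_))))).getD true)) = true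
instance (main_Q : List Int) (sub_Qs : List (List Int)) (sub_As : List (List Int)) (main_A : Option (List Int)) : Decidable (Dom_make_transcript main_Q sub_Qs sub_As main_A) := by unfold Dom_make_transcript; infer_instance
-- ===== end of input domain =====

-- B recursively builds one element-level stream of (token, token_type) pairs and unzips it, instead of A's loop with two parallel accumulators; objective: alternative decomposition.


-- ===== PORT A =====
-- loop over zip(sub_Qs, sub_As) extending both accumulators, as in A
def make_transcript (main_Q : List Int) (sub_Qs : List (List Int)) (sub_As : List (List Int)) (main_A : Option (List Int)) : List Int × List Int :=
  let transcript := ([] : List Int) ++ main_Q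
  let tokens := ([] : List Int) ++ List.replicate main_Q.length 2
  let st := (sub_Qs.zip sub_As).foldl
    (fun (p : List Int × List Int) qa =>
      (p.1 ++ qa.1 ++ qa.2,
       p.2 ++ List.replicate qa.1.length 0 ++ List.replicate qa.2.length 1))
    (transcript, tokens)
  match main_A with
  | none => st
  | some a => (st.1 ++ a, st.2 ++ List.replicate a.length 3)

-- ===== PORT B =====
-- B's recursive helper `tagged`: element-level (token, type) pairs for the sub Q/A lists,
-- ending with main_A's tagged tokens (the recursion's base case), as in Source B
def mtTagged (main_A : Option (List Int)) : List (List Int) → List (List Int) → List (Int × Int)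
  | [], _ => match main_A with | none => [] | some a => a.map (fun t => (t, 3))
  | _ :: _, [] => match main_A with | none => [] | some a => a.map (fun t => (t, 3))
  | q :: qs, a :: ans =>
      q.map (fun t => (t, 0)) ++ a.map (fun t => (t, 1)) ++ mtTagged main_A qs ans

def make_transcript_alt (main_Q : List Int) (sub_Qs : List (List Int)) (sub_As : List (List Int)) (main_A : Option (List Int)) : List Int × List Int :=
  let pairs := main_Q.map (fun t => (t, (2 : Int))) ++ mtTagged main_A sub_Qs sub_As
  (pairs.map Prod.fst, pairs.map Prod.snd)

-- ===== PRECONDITION & SPEC =====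
def Spec_make_transcript (main_Q : List Int) (sub_Qs : List (List Int)) (sub_As : List (List Int)) (main_A : Option (List Int)) (out : List Int × List Int) : Prop := out = make_transcript_alt main_Q sub_Qs sub_As main_A
instance (main_Q : List Int) (sub_Qs : List (List Int)) (sub_As : List (List Int)) (main_A : Option (List Int)) (out : List Int × List Int) : Decidable (Spec_make_transcript main_Q sub_Qs sub_As main_A out) := by unfold Spec_make_transcript; infer_instance

-- ===== CLAIM (what is proved, stated in full; the proofs are below) =====
def Claim_equal_make_transcript : Prop := ∀ (main_Q : List Int) (sub_Qs : List (List Int)) (sub_As : List (List Int)) (main_A : Option (List Int)), Dom_make_transcript main_Q sub_Qs sub_As main_A → Spec_make_transcript main_Q sub_Qs sub_As main_A (make_transcript main_Q sub_Qs sub_As main_A)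

-- ===== LEMMAS AND PROOFS =====

theorem map_const_rep (l : List Int) (c : Int) :
    l.map (fun _ => c) = List.replicate l.length c := by
  induction l with
  | nil => rfl
  | cons h t ih => simp [List.replicate_succ, ih]

-- fst/snd projections of B's tagged stream over the sub lists
theorem mtTagged_fst (main_A : Option (List Int)) (qs ans : List (List Int)) :
    (mtTagged main_A qs ans).map Prod.fst
    = (qs.zip ans).flatMap (fun qa => qa.1 ++ qa.2)
      ++ (match main_A with | none => [] | some a => a) := by
  induction qs generalizing ans with
  | nil => cases main_A <;> simp [mtTagged, Function.comp_def]
  | cons q qs ih =>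
    cases ans with
    | nil => cases main_A <;> simp [mtTagged, Function.comp_def]
    | cons a ans => simp [mtTagged, Function.comp_def, ih, List.append_assoc]

theorem mtTagged_snd (main_A : Option (List Int)) (qs ans : List (List Int)) :
    (mtTagged main_A qs ans).map Prod.snd
    = (qs.zip ans).flatMap (fun qa => List.replicate qa.1.length (0:Int) ++ List.replicate qa.2.length (1:Int))
      ++ (match main_A with | none => [] | some a => List.replicate a.length (3:Int)) := by
  induction qs generalizing ans with
  | nil => cases main_A <;> simp [mtTagged, Function.comp_def]
  | cons q qs ih =>
    cases ans with
    | nil => cases main_A <;> simp [mtTagged, Function.comp_def]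
    | cons a ans =>
      simp only [mtTagged, List.map_append, List.map_map, Function.comp_def, map_const_rep, ih,
        List.zip_cons_cons, List.flatMap_cons, List.append_assoc]

-- A's loop, run from accumulator (t, k), appends the flattened segments/labels of the zip list.
theorem mt_foldl_eq (L : List (List Int × List Int)) (t k : List Int) :
    L.foldl (fun (p : List Int × List Int) qa =>
      (p.1 ++ qa.1 ++ qa.2,
       p.2 ++ List.replicate qa.1.length 0 ++ List.replicate qa.2.length 1)) (t, k)
    = (t ++ L.flatMap (fun qa => qa.1 ++ qa.2),
       k ++ L.flatMap (fun qa => List.replicate qa.1.length 0 ++ List.replicate qa.2.length 1)) := by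
  induction L generalizing t k with
  | nil => simp
  | cons hd tl ih => rw [List.foldl_cons, ih]; simp [List.flatMap_cons, List.append_assoc]

-- ===== VERDICT (by name: the statement is the Claim_ definition above) =====
theorem make_transcript_spec : Claim_equal_make_transcript := by
  intro main_Q sub_Qs sub_As main_A _
  unfold Spec_make_transcript make_transcript make_transcript_alt
  simp only [mt_foldl_eq]
  cases main_A <;>
    simp [List.map_append, mtTagged_fst, mtTagged_snd, Function.comp_def,
      List.append_assoc]
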